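-- pv_equiv track=rewrite | github.com/dacostaEF/loterias-inteligentes | 03_IA_Executaveis/app.py | aplicar_filtro_espacial
-- ===== SOURCE A (Python) =====
-- def aplicar_filtro_espacial(cartao, MAX_LINHAS_VAZIAS, MAX_NUMEROS_POR_LINHA, MAX_COLUNAS_VAZIAS, MAX_NUMEROS_POR_COLUNA):
--     matriz_5x5 = [
--         [1, 2, 3, 4, 5],
--         [6, 7, 8, 9, 10],
--         [11, 12, 13, 14, 15],
--         [16, 17, 18, 19, 20],
--         [21, 22, 23, 24, 25]
--     ]
--
--     linhas_vazias = 0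
--     for linha in matriz_5x5:
--         if not any(num in cartao for num in linha):
--             linhas_vazias += 1
--     if linhas_vazias > MAX_LINHAS_VAZIAS:
--         return False
--
--     colunas_vazias = 0
--     for col_idx in range(5):
--         coluna = [matriz_5x5[row_idx][col_idx] for row_idx in range(5)]
--         if not any(num in cartao for num in coluna):
--             colunas_vazias += 1
--     if colunas_vazias > MAX_COLUNAS_VAZIAS:
--         return False
--
--     for linha in matriz_5x5:
--         if sum(1 for num in linha if num in cartao) > MAX_NUMEROS_POR_LINHA:
--             return False
--
--     for col_idx in range(5):
--         coluna = [matriz_5x5[row_idx][col_idx] for row_idx in range(5)]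
--         if sum(1 for num in coluna if num in cartao) > MAX_NUMEROS_POR_COLUNA:
--             return False
--
--     return True
-- ===== SOURCE B (Python) =====
-- def aplicar_filtro_espacial(cartao, MAX_LINHAS_VAZIAS, MAX_NUMEROS_POR_LINHA, MAX_COLUNAS_VAZIAS, MAX_NUMEROS_POR_COLUNA):
--     # Map each distinct card number once to its grid coordinates; the 5x5 grid is never enumerated.
--     rows = {}
--     cols = {}
--     for n in dict.fromkeys(cartao):
--         if 1 <= n <= 25:
--             q, s = divmod(n - 1, 5)
--             rows[q] = rows.get(q, 0) + 1
--             cols[s] = cols.get(s, 0) + 1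
--     linhas_vazias = sum(1 for i in range(5) if rows.get(i, 0) == 0)
--     colunas_vazias = sum(1 for i in range(5) if cols.get(i, 0) == 0)
--     dentro = all(rows.get(i, 0) <= MAX_NUMEROS_POR_LINHA and cols.get(i, 0) <= MAX_NUMEROS_POR_COLUNA
--                  for i in range(5))
--     return linhas_vazias <= MAX_LINHAS_VAZIAS and colunas_vazias <= MAX_COLUNAS_VAZIAS and dentro
-- ===== Notes on version B (the rewrite author's own statement) =====
-- stated objective: faster
-- what changed: A enumerates the 5x5 grid and scans the whole card for every cell/row/column membership test; B never enumerates the grid: it maps each distinct card number once to its (row, column) coordinate via divmod(n-1,5), accumulating two counter dictionaries, and checks all four thresholds off the counters.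
import Mathlib
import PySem

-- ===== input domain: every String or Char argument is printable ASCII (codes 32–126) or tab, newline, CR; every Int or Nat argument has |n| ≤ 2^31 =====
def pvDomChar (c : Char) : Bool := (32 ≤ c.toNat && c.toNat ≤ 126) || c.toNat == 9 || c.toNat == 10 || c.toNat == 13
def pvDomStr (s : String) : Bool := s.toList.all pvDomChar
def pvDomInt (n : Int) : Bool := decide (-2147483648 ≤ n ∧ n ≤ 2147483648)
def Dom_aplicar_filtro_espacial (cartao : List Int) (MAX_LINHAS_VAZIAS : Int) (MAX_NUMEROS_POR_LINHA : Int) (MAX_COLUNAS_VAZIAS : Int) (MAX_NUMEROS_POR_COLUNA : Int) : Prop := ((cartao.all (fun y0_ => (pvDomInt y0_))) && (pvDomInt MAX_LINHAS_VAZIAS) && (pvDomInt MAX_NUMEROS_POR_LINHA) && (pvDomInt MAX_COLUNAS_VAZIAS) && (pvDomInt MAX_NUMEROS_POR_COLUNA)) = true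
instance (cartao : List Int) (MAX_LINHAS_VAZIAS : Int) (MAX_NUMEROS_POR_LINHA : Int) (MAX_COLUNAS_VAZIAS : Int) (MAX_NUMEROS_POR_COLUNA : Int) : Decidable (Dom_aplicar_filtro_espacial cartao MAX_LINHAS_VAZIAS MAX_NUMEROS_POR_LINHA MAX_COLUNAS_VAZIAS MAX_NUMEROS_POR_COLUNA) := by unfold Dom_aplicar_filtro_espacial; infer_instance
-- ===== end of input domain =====

-- B maps each distinct card number once to its (row, column) coordinate via divmod, accumulating two
-- counter dictionaries; the 5x5 grid is never enumerated and the card is traversed once (constant-factor faster).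


-- ===== PORT A =====
-- the literal 5x5 bingo matrix from A
def pvMatriz : List (List Int) :=
  [[1, 2, 3, 4, 5],
   [6, 7, 8, 9, 10],
   [11, 12, 13, 14, 15],
   [16, 17, 18, 19, 20],
   [21, 22, 23, 24, 25]]

def aplicar_filtro_espacial (cartao : List Int) (MAX_LINHAS_VAZIAS : Int) (MAX_NUMEROS_POR_LINHA : Int) (MAX_COLUNAS_VAZIAS : Int) (MAX_NUMEROS_POR_COLUNA : Int) : Bool :=
  -- linhas_vazias loop
  let linhas_vazias : Int := pvMatriz.foldl
    (fun acc linha => if !(linha.any (fun num => cartao.contains num)) then acc + 1 else acc) 0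
  if linhas_vazias > MAX_LINHAS_VAZIAS then false
  else
    -- colunas_vazias loop; matrix indexing via getD is exact: indices come from range(5)
    let colunas_vazias : Int := (PySem.List.pyRange 0 5 1).foldl
      (fun acc ci =>
        let coluna := (PySem.List.pyRange 0 5 1).map
          (fun ri => PySem.List.pyGetD (PySem.List.pyGetD pvMatriz ri []) ci 0)
        if !(coluna.any (fun num => cartao.contains num)) then acc + 1 else acc) 0
    if colunas_vazias > MAX_COLUNAS_VAZIAS then false
    else
      -- per-row count loop with early return False = any
      if pvMatriz.any (fun linha =>
           linha.foldl (fun a num => if cartao.contains num then a + 1 else a) (0 : Int)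
             > MAX_NUMEROS_POR_LINHA) then false
      else
        -- per-column count loop with early return False = any
        if (PySem.List.pyRange 0 5 1).any (fun ci =>
             ((PySem.List.pyRange 0 5 1).map
                 (fun ri => PySem.List.pyGetD (PySem.List.pyGetD pvMatriz ri []) ci 0)).foldl
               (fun a num => if cartao.contains num then a + 1 else a) (0 : Int)
               > MAX_NUMEROS_POR_COLUNA) then false
        else true

-- ===== PORT B =====
-- loop body of B's single pass over dict.fromkeys(cartao): q, s = divmod(n-1, 5); bump both counters
def pvStep (rc : PySem.Dict Int Int × PySem.Dict Int Int) (n : Int) : PySem.Dict Int Int × PySem.Dict Int Int :=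
  if 1 ≤ n ∧ n ≤ 25 then
    (rc.1.insert (PySem.Int.floordiv (n - 1) 5) (rc.1.getD (PySem.Int.floordiv (n - 1) 5) 0 + 1),
     rc.2.insert (PySem.Int.mod (n - 1) 5) (rc.2.getD (PySem.Int.mod (n - 1) 5) 0 + 1))
  else rc

-- the two counter dicts (rows, cols) after the pass over the deduplicated card
def pvBuildCounts (cartao : List Int) : PySem.Dict Int Int × PySem.Dict Int Int :=
  (PySem.List.dedup cartao).foldl pvStep (PySem.Dict.empty, PySem.Dict.empty)

def aplicar_filtro_espacial_alt (cartao : List Int) (MAX_LINHAS_VAZIAS : Int) (MAX_NUMEROS_POR_LINHA : Int) (MAX_COLUNAS_VAZIAS : Int) (MAX_NUMEROS_POR_COLUNA : Int) : Bool :=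
  let rcs := pvBuildCounts cartao
  -- linhas_vazias / colunas_vazias as 0/1-sums over range(5)
  let linhas_vazias : Int := (PySem.List.pyRange 0 5 1).foldl
    (fun a i => if rcs.1.getD i 0 == 0 then a + 1 else a) 0
  let colunas_vazias : Int := (PySem.List.pyRange 0 5 1).foldl
    (fun a i => if rcs.2.getD i 0 == 0 then a + 1 else a) 0
  -- all(rows.get(i,0) <= ... and cols.get(i,0) <= ... for i in range(5))
  let dentro : Bool := (PySem.List.pyRange 0 5 1).all
    (fun i => decide (rcs.1.getD i 0 ≤ MAX_NUMEROS_POR_LINHA)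
           && decide (rcs.2.getD i 0 ≤ MAX_NUMEROS_POR_COLUNA))
  decide (linhas_vazias ≤ MAX_LINHAS_VAZIAS) && decide (colunas_vazias ≤ MAX_COLUNAS_VAZIAS) && dentro

-- ===== PRECONDITION & SPEC =====
def Spec_aplicar_filtro_espacial (cartao : List Int) (MAX_LINHAS_VAZIAS : Int) (MAX_NUMEROS_POR_LINHA : Int) (MAX_COLUNAS_VAZIAS : Int) (MAX_NUMEROS_POR_COLUNA : Int) (out : Bool) : Prop := out = aplicar_filtro_espacial_alt cartao MAX_LINHAS_VAZIAS MAX_NUMEROS_POR_LINHA MAX_COLUNAS_VAZIAS MAX_NUMEROS_POR_COLUNA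
instance (cartao : List Int) (MAX_LINHAS_VAZIAS : Int) (MAX_NUMEROS_POR_LINHA : Int) (MAX_COLUNAS_VAZIAS : Int) (MAX_NUMEROS_POR_COLUNA : Int) (out : Bool) : Decidable (Spec_aplicar_filtro_espacial cartao MAX_LINHAS_VAZIAS MAX_NUMEROS_POR_LINHA MAX_COLUNAS_VAZIAS MAX_NUMEROS_POR_COLUNA out) := by unfold Spec_aplicar_filtro_espacial; infer_instance

-- ===== CLAIM (what is proved, stated in full; the proofs are below) =====
def Claim_equal_aplicar_filtro_espacial : Prop := ∀ (cartao : List Int) (MAX_LINHAS_VAZIAS : Int) (MAX_NUMEROS_POR_LINHA : Int) (MAX_COLUNAS_VAZIAS : Int) (MAX_NUMEROS_POR_COLUNA : Int), Dom_aplicar_filtro_espacial cartao MAX_LINHAS_VAZIAS MAX_NUMEROS_POR_LINHA MAX_COLUNAS_VAZIAS MAX_NUMEROS_POR_COLUNA → Spec_aplicar_filtro_espacial cartao MAX_LINHAS_VAZIAS MAX_NUMEROS_POR_LINHA MAX_COLUNAS_VAZIAS MAX_NUMEROS_POR_COLUNA (aplicar_filtro_espacial cartao MAX_LINHAS_VAZIAS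 MAX_NUMEROS_POR_LINHA MAX_COLUNAS_VAZIAS MAX_NUMEROS_POR_COLUNA)

-- ===== LEMMAS AND PROOFS =====
theorem pvRows_getD (l : List Int) (d e : PySem.Dict Int Int) (r : Int) :
    ((l.foldl pvStep (d, e)).1).getD r 0
      = d.getD r 0 + (l.countP (fun n => decide (1 ≤ n ∧ n ≤ 25 ∧ PySem.Int.floordiv (n - 1) 5 = r)) : Int) := by
  induction l generalizing d e with
  | nil => simp
  | cons n l ih =>
    simp only [List.foldl_cons, List.countP_cons, pvStep]
    by_cases h : 1 ≤ n ∧ n ≤ 25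
    · rw [if_pos h, ih, PySem.Dict.getD_insert]
      have hdec : (decide (1 ≤ n ∧ n ≤ 25 ∧ PySem.Int.floordiv (n - 1) 5 = r))
          = decide (PySem.Int.floordiv (n - 1) 5 = r) := by
        by_cases hr : PySem.Int.floordiv (n - 1) 5 = r <;> simp [h]
      rw [hdec]
      by_cases hr : PySem.Int.floordiv (n - 1) 5 = r
      · rw [if_pos hr.symm, hr]
        simp only [decide_true]
        push_cast
        ring
      · rw [if_neg (fun hh => hr hh.symm), decide_eq_false hr]
        simp
    · rw [if_neg h, ih]
      have hdec : (decide (1 ≤ n ∧ n ≤ 25 ∧ PySem.Int.floordiv (n - 1) 5 = r)) = false := by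
        simp only [decide_eq_false_iff_not]; tauto
      rw [hdec]
      simp
theorem pvCols_getD (l : List Int) (d e : PySem.Dict Int Int) (c : Int) :
    ((l.foldl pvStep (d, e)).2).getD c 0
      = e.getD c 0 + (l.countP (fun n => decide (1 ≤ n ∧ n ≤ 25 ∧ PySem.Int.mod (n - 1) 5 = c)) : Int) := by
  induction l generalizing d e with
  | nil => simp
  | cons n l ih =>
    simp only [List.foldl_cons, List.countP_cons, pvStep]
    by_cases h : 1 ≤ n ∧ n ≤ 25
    · rw [if_pos h, ih, PySem.Dict.getD_insert]
      have hdec : (decide (1 ≤ n ∧ n ≤ 25 ∧ PySem.Int.mod (n - 1) 5 = c))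
          = decide (PySem.Int.mod (n - 1) 5 = c) := by
        by_cases hc : PySem.Int.mod (n - 1) 5 = c <;> simp [h]
      rw [hdec]
      by_cases hc : PySem.Int.mod (n - 1) 5 = c
      · rw [if_pos hc.symm, hc]
        simp only [decide_true]
        push_cast
        ring
      · rw [if_neg (fun hh => hc hh.symm), decide_eq_false hc]
        simp
    · rw [if_neg h, ih]
      have hdec : (decide (1 ≤ n ∧ n ≤ 25 ∧ PySem.Int.mod (n - 1) 5 = c)) = false := by
        simp only [decide_eq_false_iff_not]; tauto
      rw [hdec]
      simp

-- counting a disjunction of incompatible predicates splits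
theorem countP_or_disjoint {α : Type} (p q : α → Bool) (l : List α)
    (h : ∀ x, ¬(p x = true ∧ q x = true)) :
    l.countP (fun x => p x || q x) = l.countP p + l.countP q := by
  induction l with
  | nil => simp
  | cons x l ih =>
    simp only [List.countP_cons, ih]
    have := h x
    cases hp : p x <;> cases hq : q x <;> simp_all <;> omega

-- membership count swap: over a duplicate-free list, counting members of ks equals counting ks-elements present
theorem countP_mem_swap (l ks : List Int) (hl : l.Nodup) (hks : ks.Nodup) :
    l.countP (fun x => decide (x ∈ ks)) = ks.countP (fun k => decide (k ∈ l)) := by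
  induction ks with
  | nil => simp
  | cons k ks ih =>
    have hk : k ∉ ks := (List.nodup_cons.mp hks).1
    have hks' : ks.Nodup := (List.nodup_cons.mp hks).2
    have hsplit : l.countP (fun x => decide (x ∈ k :: ks))
        = l.countP (fun x => decide (x = k)) + l.countP (fun x => decide (x ∈ ks)) := by
      rw [← countP_or_disjoint (fun x => decide (x = k)) (fun x => decide (x ∈ ks)) l
        (by intro x hx; simp at hx; exact hk (hx.1 ▸ hx.2))]
      apply List.countP_congr
      intro x _
      simp [List.mem_cons]
    rw [hsplit, ih hks', List.countP_cons]
    have hcount : l.countP (fun x => decide (x = k)) = if k ∈ l then 1 else 0 := by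
      by_cases hm : k ∈ l
      · rw [if_pos hm]
        have := List.count_eq_one_of_mem hl hm
        simpa [List.count] using this
      · rw [if_neg hm]
        rw [List.countP_eq_zero]
        intro x hx
        simp
        intro hxk
        exact absurd (hxk ▸ hx) hm
    rw [hcount]
    by_cases hm : k ∈ l
    · simp [hm]
      omega
    · simp [hm]
-- chain: B's row counter value = count of the row's five cells present on the card
theorem pv_row_count (cartao : List Int) (r : Int) (ks : List Int) (hks : ks.Nodup)
    (hchar : ∀ n : Int, (1 ≤ n ∧ n ≤ 25 ∧ PySem.Int.floordiv (n - 1) 5 = r) ↔ n ∈ ks) :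
    ((pvBuildCounts cartao).1).getD r 0 = (ks.countP (fun k => cartao.contains k) : Int) := by
  unfold pvBuildCounts
  rw [pvRows_getD]
  rw [List.countP_congr (q := fun n => decide (n ∈ ks))
    (fun n _ => by simp only [decide_eq_true_eq]; exact hchar n)]
  rw [countP_mem_swap _ ks (PySem.List.nodup_dedup cartao) hks]
  rw [List.countP_congr (q := fun k => cartao.contains k)
    (fun k _ => by simp)]
  simp

theorem pv_col_count (cartao : List Int) (c : Int) (ks : List Int) (hks : ks.Nodup)
    (hchar : ∀ n : Int, (1 ≤ n ∧ n ≤ 25 ∧ PySem.Int.mod (n - 1) 5 = c) ↔ n ∈ ks) :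
    ((pvBuildCounts cartao).2).getD c 0 = (ks.countP (fun k => cartao.contains k) : Int) := by
  unfold pvBuildCounts
  rw [pvCols_getD]
  rw [List.countP_congr (q := fun n => decide (n ∈ ks))
    (fun n _ => by simp only [decide_eq_true_eq]; exact hchar n)]
  rw [countP_mem_swap _ ks (PySem.List.nodup_dedup cartao) hks]
  rw [List.countP_congr (q := fun k => cartao.contains k)
    (fun k _ => by simp)]
  simp
-- a five-term 0/1 sum vanishes iff none of the five conditions holds
theorem sum5_eq_zero (P1 P2 P3 P4 P5 : Prop) [Decidable P1] [Decidable P2] [Decidable P3] [Decidable P4] [Decidable P5] :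
    (((((if P5 then (1:Int) else 0) + if P4 then 1 else 0) + if P3 then 1 else 0) +
        if P2 then 1 else 0) + if P1 then 1 else 0) = 0 ↔ (¬P1 ∧ ¬P2 ∧ ¬P3 ∧ ¬P4 ∧ ¬P5) := by
  by_cases h1 : P1 <;> by_cases h2 : P2 <;> by_cases h3 : P3 <;> by_cases h4 : P4 <;>
    by_cases h5 : P5 <;> simp [h1, h2, h3, h4, h5]

-- "a ≤ b" is the negation of "b < a", at the Bool level
theorem decide_le_eq_not_lt (a b : Int) : decide (a ≤ b) = !decide (b < a) := by
  rw [← decide_not]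
  exact decide_eq_decide.mpr (Int.not_lt).symm
-- ===== VERDICT (by name: the statement is the Claim_ definition above) =====
theorem aplicar_filtro_espacial_spec : Claim_equal_aplicar_filtro_espacial := by
  intro cartao MLV MNL MCV MNC _
  unfold Spec_aplicar_filtro_espacial
  have hfd : ∀ n : Int, PySem.Int.floordiv (n - 1) 5 = (n - 1) / 5 :=
    fun n => PySem.Int.floordiv_eq_ediv_of_pos (by norm_num)
  have hmd : ∀ n : Int, PySem.Int.mod (n - 1) 5 = (n - 1) % 5 :=
    fun n => PySem.Int.mod_eq_emod_of_pos (by norm_num)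
  have hR0 := pv_row_count cartao 0 [1,2,3,4,5] (by decide)
    (fun n => by rw [hfd]; simp only [List.mem_cons, List.not_mem_nil, or_false]; omega)
  have hR1 := pv_row_count cartao 1 [6,7,8,9,10] (by decide)
    (fun n => by rw [hfd]; simp only [List.mem_cons, List.not_mem_nil, or_false]; omega)
  have hR2 := pv_row_count cartao 2 [11,12,13,14,15] (by decide)
    (fun n => by rw [hfd]; simp only [List.mem_cons, List.not_mem_nil, or_false]; omega)
  have hR3 := pv_row_count cartao 3 [16,17,18,19,20] (by decide)
    (fun n => by rw [hfd]; simp only [List.mem_cons, List.not_mem_nil, or_false]; omega)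
  have hR4 := pv_row_count cartao 4 [21,22,23,24,25] (by decide)
    (fun n => by rw [hfd]; simp only [List.mem_cons, List.not_mem_nil, or_false]; omega)
  have hC0 := pv_col_count cartao 0 [1,6,11,16,21] (by decide)
    (fun n => by rw [hmd]; simp only [List.mem_cons, List.not_mem_nil, or_false]; omega)
  have hC1 := pv_col_count cartao 1 [2,7,12,17,22] (by decide)
    (fun n => by rw [hmd]; simp only [List.mem_cons, List.not_mem_nil, or_false]; omega)
  have hC2 := pv_col_count cartao 2 [3,8,13,18,23] (by decide)
    (fun n => by rw [hmd]; simp only [List.mem_cons, List.not_mem_nil, or_false]; omega)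
  have hC3 := pv_col_count cartao 3 [4,9,14,19,24] (by decide)
    (fun n => by rw [hmd]; simp only [List.mem_cons, List.not_mem_nil, or_false]; omega)
  have hC4 := pv_col_count cartao 4 [5,10,15,20,25] (by decide)
    (fun n => by rw [hmd]; simp only [List.mem_cons, List.not_mem_nil, or_false]; omega)
  have hr : PySem.List.pyRange 0 5 1 = [0, 1, 2, 3, 4] := by decide
  simp only [aplicar_filtro_espacial, aplicar_filtro_espacial_alt, pvMatriz, hr,
    PySem.List.foldl_count_if]
  simp only [List.map_cons, List.map_nil, List.any_cons,
    List.any_nil, List.all_cons, List.all_nil, List.countP_cons, List.countP_nil,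
    hR0, hR1, hR2, hR3, hR4, hC0, hC1, hC2, hC3, hC4, zero_add]
  norm_num [PySem.List.pyGetD_ofNat', Int.reduceToNat]
  simp only [sum5_eq_zero, decide_le_eq_not_lt]
  ac_rfl
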